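-- pv_equiv track=rewrite | github.com/ashblend17/ICS215 | DSA2/L84.py | find_rightmost_set_bit_position
-- ===== SOURCE A (Python) =====
-- def find_rightmost_set_bit_position(n):
--     if n == 0:
--         return 0
--
--     position = 1
--     while n & 1 == 0:
--         n >>= 1
--         position += 1
--
--     return position
-- ===== SOURCE B (Python) =====
-- def find_rightmost_set_bit_position(n):
--     return (n & -n).bit_length()
-- ===== Notes on version B (the rewrite author's own statement) =====
-- stated objective: idiomatic
-- what changed: Replaces the trailing-zero while-loop with the closed-form bit trick (n & -n).bit_length(): n & -n isolates the lowest set bit and bit_length returns its position, so no loop remains.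
import Mathlib
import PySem

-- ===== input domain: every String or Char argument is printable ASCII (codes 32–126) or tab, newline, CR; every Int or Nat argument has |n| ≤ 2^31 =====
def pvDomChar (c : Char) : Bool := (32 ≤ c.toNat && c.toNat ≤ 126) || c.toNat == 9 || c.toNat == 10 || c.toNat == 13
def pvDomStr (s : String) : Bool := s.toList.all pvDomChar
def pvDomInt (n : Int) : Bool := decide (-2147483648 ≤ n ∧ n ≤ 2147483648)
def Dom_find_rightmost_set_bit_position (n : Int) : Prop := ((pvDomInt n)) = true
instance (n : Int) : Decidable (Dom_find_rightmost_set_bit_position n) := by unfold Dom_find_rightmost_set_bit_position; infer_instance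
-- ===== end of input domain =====

-- B replaces A's trailing-zero while-loop by the closed form (n & -n).bit_length() (idiomatic; no loop).

-- ===== PORT A =====
-- A's while-loop; the 'n = 0' branch is a totality guard only: A enters the loop with
-- n ≠ 0, and the state stays ≠ 0 (an even nonzero n shifted right is nonzero)
def pvLoopA_find_rightmost_set_bit_position (n : Int) (position : Int) : Int :=
  if _h0 : n = 0 then position
  else if _h1 : PySem.Int.band n 1 = 0 then
    pvLoopA_find_rightmost_set_bit_position (n >>> (1:Nat)) (position + 1)
  else position
termination_by n.natAbs
decreasing_by
  have h2 : (2:Int) ∣ n := by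
    have hb := PySem.Int.band_one n
    exact (PySem.Int.mod_eq_zero_iff_dvd n 2).mp (hb ▸ _h1)
  obtain ⟨t, ht⟩ := h2
  have hsh : n >>> (1:Nat) = t := by rw [Int.shiftRight_eq_div_pow]; omega
  rw [hsh]; omega

def find_rightmost_set_bit_position (n : Int) : Int :=
  if n = 0 then 0
  else pvLoopA_find_rightmost_set_bit_position n 1

-- ===== PORT B =====
def find_rightmost_set_bit_position_alt (n : Int) : Int :=
  (PySem.Int.bitLength (PySem.Int.band n (-n)) : Int)

-- ===== PRECONDITION & SPEC =====
def Spec_find_rightmost_set_bit_position (n : Int) (out : Int) : Prop := out = find_rightmost_set_bit_position_alt n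
instance (n : Int) (out : Int) : Decidable (Spec_find_rightmost_set_bit_position n out) := by unfold Spec_find_rightmost_set_bit_position; infer_instance

-- ===== CLAIM (what is proved, stated in full; the proofs are below) =====
def Claim_equal_find_rightmost_set_bit_position : Prop := ∀ (n : Int), Dom_find_rightmost_set_bit_position n → Spec_find_rightmost_set_bit_position n (find_rightmost_set_bit_position n)

-- ===== LEMMAS AND PROOFS =====

theorem pv_tb2 (b j : Nat) : (2*b).testBit (j+1) = b.testBit j := by
  rw [Nat.testBit_succ, Nat.mul_div_cancel_left _ (by norm_num)]

theorem pv_tb21 (b j : Nat) : (2*b+1).testBit (j+1) = b.testBit j := by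
  rw [Nat.testBit_succ]; congr 1; omega

theorem pv_tb0 (b : Nat) : (2*b).testBit 0 = false := by
  simp [Nat.testBit_zero]

theorem pv_tb01 (b : Nat) : (2*b+1).testBit 0 = true := by
  simp [Nat.testBit_zero]

theorem pv_land_odd_even (a b : Nat) : (2*a+1) &&& (2*b) = 2*(a &&& b) := by
  apply Nat.eq_of_testBit_eq; intro i
  cases i with
  | zero => rw [Nat.testBit_land, pv_tb01, pv_tb0, pv_tb0]; simp
  | succ j => rw [Nat.testBit_land, pv_tb21, pv_tb2, pv_tb2, Nat.testBit_land]

-- the Nat-side value of Python's n & -n: the lowest set bit of |n|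
def pvLowbit (m : Nat) : Nat := m - (m &&& (m - 1))

theorem pv_lowbit_odd (k : Nat) : pvLowbit (2*k+1) = 1 := by
  unfold pvLowbit
  have h1 : 2*k+1-1 = 2*k := by omega
  rw [h1, pv_land_odd_even, Nat.and_self]; omega

theorem pv_lowbit_even (k : Nat) (hk : k ≠ 0) : pvLowbit (2*k) = 2 * pvLowbit k := by
  unfold pvLowbit
  have h1 : 2*k-1 = 2*(k-1)+1 := by omega
  rw [h1, Nat.land_comm, pv_land_odd_even, Nat.land_comm]
  have h2 : k-1 &&& k ≤ k := Nat.and_le_right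
  omega

theorem pv_lowbit_pos (m : Nat) (hm : m ≠ 0) : 0 < pvLowbit m := by
  induction m using Nat.strong_induction_on with
  | _ m ih =>
    rcases Nat.even_or_odd m with ⟨k, hk⟩ | ⟨k, hk⟩
    · have hk' : k ≠ 0 := by omega
      have := ih k (by omega) hk'
      rw [hk, show k + k = 2*k by omega, pv_lowbit_even k hk']; omega
    · rw [hk, show 2*k+1 = 2*k+1 from rfl, pv_lowbit_odd]; omega

-- Python's n & -n, expressed on |n|
theorem pv_band_neg (n : Int) : PySem.Int.band n (-n) = ((pvLowbit n.natAbs : Nat) : Int) := by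
  rcases lt_trichotomy n 0 with hneg | hz | hpos
  · rw [PySem.Int.band]
    rw [if_neg (by omega), if_pos (by omega : (0:Int) ≤ -n)]
    have h1 : (-n).toNat = n.natAbs := by omega
    have h2 : (-n - 1).toNat = n.natAbs - 1 := by omega
    rw [h1, h2]; rfl
  · simp [hz, pvLowbit]
  · rw [PySem.Int.band]
    rw [if_pos (by omega : (0:Int) ≤ n), if_neg (by omega : ¬ (0:Int) ≤ -n)]
    have h1 : n.toNat = n.natAbs := by omega
    have h2 : (- -n - 1).toNat = n.natAbs - 1 := by omega
    rw [h1, h2]; rfl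

theorem pv_bitLength_two_mul (k : Nat) (hk : k ≠ 0) :
    PySem.Int.bitLength ((2*k : Nat) : Int) = PySem.Int.bitLength ((k : Nat) : Int) + 1 := by
  rw [PySem.Int.bitLength_natCast (by omega : 0 < 2*k)]
  congr 2
  omega

-- A's loop computes position + bit_length(lowest set bit of |n|) - 1, for n ≠ 0
theorem pv_loop_eq (m : Nat) : ∀ (n : Int), n.natAbs = m → n ≠ 0 → ∀ (p : Int),
    pvLoopA_find_rightmost_set_bit_position n p
      = p + (PySem.Int.bitLength ((pvLowbit m : Nat) : Int) : Int) - 1 := by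
  induction m using Nat.strong_induction_on with
  | _ m ih =>
    intro n hm hn p
    rcases Nat.even_or_odd m with ⟨k, hk⟩ | ⟨k, hk⟩
    · -- |n| even, so n = 2t with t ≠ 0
      have hdvd : (2:Int) ∣ n := by
        rcases Int.even_or_odd n with he | ho
        · exact he.two_dvd
        · exfalso; obtain ⟨c, hc⟩ := ho; omega
      obtain ⟨t, ht⟩ := hdvd
      have ht0 : t ≠ 0 := by omega
      have hband : PySem.Int.band n 1 = 0 := by
        rw [PySem.Int.band_one, PySem.Int.mod_eq_zero_iff_dvd]; exact ⟨t, ht⟩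
      have hsh : n >>> (1:Nat) = t := by rw [Int.shiftRight_eq_div_pow]; omega
      have hk0 : k ≠ 0 := by omega
      have htk : t.natAbs = k := by omega
      rw [pvLoopA_find_rightmost_set_bit_position.eq_def, dif_neg hn, dif_pos hband, hsh,
          ih k (by omega) t htk ht0 (p+1)]
      rw [hk, show k + k = 2*k by omega, pv_lowbit_even k hk0,
          pv_bitLength_two_mul _ (by have := pv_lowbit_pos k hk0; omega)]
      push_cast; ring
    · -- |n| odd, so n is odd: the loop returns p at once
      have hodd : PySem.Int.band n 1 ≠ 0 := by
        intro h
        rw [PySem.Int.band_one] at h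
        obtain ⟨c, hc⟩ := (PySem.Int.mod_eq_zero_iff_dvd n 2).mp h
        omega
      rw [pvLoopA_find_rightmost_set_bit_position.eq_def, dif_neg hn, dif_neg hodd,
          hk, pv_lowbit_odd]
      norm_num [show PySem.Int.bitLength 1 = 1 from rfl]

-- ===== VERDICT (by name: the statement is the Claim_ definition above) =====
theorem find_rightmost_set_bit_position_spec : Claim_equal_find_rightmost_set_bit_position := by
  intro n _
  unfold Spec_find_rightmost_set_bit_position find_rightmost_set_bit_position find_rightmost_set_bit_position_alt
  by_cases hn : n = 0
  · simp [hn, PySem.Int.bitLength_zero]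
  · rw [if_neg hn, pv_loop_eq n.natAbs n rfl hn 1, pv_band_neg]
    ring
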